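-- pv_equiv track=rewrite | github.com/open-horizon-services/service-speak-ip | speak-ip.py | ipv4_to_speech
-- ===== SOURCE A (Python) =====
-- def ipv4_to_speech(ipv4):
--   nums = ipv4.split('.')
--   out = ''
--   for n in nums:
--     s = str(n)
--     for c in s:
--       out += (c + ' ')
--     out += 'dot '
--   return out[:-4]
-- ===== SOURCE B (Python) =====
-- def ipv4_to_speech(ipv4):
--   out = ''
--   for c in ipv4:
--     out += 'dot ' if c == '.' else c + ' '
--   return out
-- ===== Notes on version B (the rewrite author's own statement) =====
-- stated objective: simpler
-- what changed: Replaces split-on-dot plus nested per-token loop plus a trailing [:-4] slice with a single character pass that emits a spoken-dot token for each dot character and the character plus a space otherwise, needing no final slice.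
import Mathlib
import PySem

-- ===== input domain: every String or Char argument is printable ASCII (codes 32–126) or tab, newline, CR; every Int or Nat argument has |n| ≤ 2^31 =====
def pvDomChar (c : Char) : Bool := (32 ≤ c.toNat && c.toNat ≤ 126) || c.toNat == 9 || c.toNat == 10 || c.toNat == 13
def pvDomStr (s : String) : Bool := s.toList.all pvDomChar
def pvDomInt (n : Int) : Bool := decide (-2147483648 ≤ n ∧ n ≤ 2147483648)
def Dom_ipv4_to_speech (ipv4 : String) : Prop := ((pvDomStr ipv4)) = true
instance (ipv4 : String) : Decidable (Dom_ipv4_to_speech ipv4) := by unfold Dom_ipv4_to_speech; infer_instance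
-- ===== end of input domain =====

-- B replaces A's split-on-dot + nested loops + trailing [:-4] slice by one pass over the
-- characters, emitting each character's spoken form directly (objective: simpler).

-- ===== PORT A =====
-- A: split on the dot character, then per token each character followed by a space, then the
-- spoken dot word; finally out[:-4]. (str(n) on a string is the identity and is dropped.)
def ipv4_to_speech (ipv4 : String) : String :=
  let nums := PySem.Chars.splitOn ipv4.toList ['.']
  let out : List Char :=
    nums.foldl (fun out n =>
      (n.foldl (fun out c => out ++ [c, ' ']) out) ++ "dot ".toList) []
  String.ofList (PySem.List.slice out none (some (-4)))

-- ===== PORT B =====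
def ipv4_to_speech_alt (ipv4 : String) : String :=
  String.ofList
    (ipv4.toList.foldl (fun out c => out ++ (if c = '.' then "dot ".toList else [c, ' '])) [])

-- ===== PRECONDITION & SPEC =====
def Spec_ipv4_to_speech (ipv4 : String) (out : String) : Prop := out = ipv4_to_speech_alt ipv4
instance (ipv4 : String) (out : String) : Decidable (Spec_ipv4_to_speech ipv4 out) := by unfold Spec_ipv4_to_speech; infer_instance

-- ===== CLAIM (what is proved, stated in full; the proofs are below) =====
def Claim_equal_ipv4_to_speech : Prop := ∀ (ipv4 : String), Dom_ipv4_to_speech ipv4 → Spec_ipv4_to_speech ipv4 (ipv4_to_speech ipv4)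

-- ===== LEMMAS AND PROOFS =====

-- proof-side specification of Python's split('.') on a char list
def pvSplitDot : List Char → List (List Char)
  | [] => [[]]
  | x :: l => if x = '.' then [] :: pvSplitDot l else (pvSplitDot l).modifyHead (x :: ·)

-- B's per-character contribution
def pvEmit (c : Char) : List Char := if c = '.' then "dot ".toList else [c, ' ']

lemma pvSplitDot_ne_nil (l : List Char) : pvSplitDot l ≠ [] := by
  cases l with
  | nil => simp [pvSplitDot]
  | cons x l =>
    simp only [pvSplitDot]
    split_ifs
    · simp
    · cases hs : pvSplitDot l with
      | nil => exact absurd hs (pvSplitDot_ne_nil l)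
      | cons a t => simp

lemma splitOn_go_eq (fuel : Nat) (l cur : List Char) (acc : List (List Char))
    (h : l.length ≤ fuel) :
    PySem.Chars.splitOn.go ['.'] fuel l cur acc
      = acc.reverse ++ (pvSplitDot l).modifyHead (cur.reverse ++ ·) := by
  induction fuel generalizing l cur acc with
  | zero =>
    have : l = [] := List.eq_nil_of_length_eq_zero (Nat.le_zero.mp h)
    subst this
    simp [PySem.Chars.splitOn.go, pvSplitDot]
  | succ fuel ih =>
    cases l with
    | nil => simp [PySem.Chars.splitOn.go, pvSplitDot]
    | cons x rest =>
      simp only [List.length_cons, Nat.succ_le_succ_iff] at h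
      by_cases hx : x = '.'
      · subst hx
        have hpre : List.isPrefixOf ['.'] ('.' :: rest) = true := by
          simp [List.isPrefixOf]
        simp only [PySem.Chars.splitOn.go, hpre, List.length_cons,
          List.length_nil, Nat.zero_add, List.drop_succ_cons, List.drop_zero]
        rw [ih rest [] (cur.reverse :: acc) h]
        simp only [pvSplitDot, List.reverse_nil, List.reverse_cons,
          List.nil_append, List.append_assoc, List.singleton_append]
        cases pvSplitDot rest <;> simp
      · have hpre : List.isPrefixOf ['.'] (x :: rest) = false := by
          simp [List.isPrefixOf]
          intro hc; exact hx hc.symm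
        simp only [PySem.Chars.splitOn.go, hpre, Bool.false_eq_true, if_false]
        rw [ih rest (x :: cur) acc h]
        simp only [pvSplitDot, if_neg hx, List.reverse_cons]
        congr 1
        cases hs : pvSplitDot rest with
        | nil => exact absurd hs (pvSplitDot_ne_nil rest)
        | cons a t => simp
lemma splitOn_eq_pvSplitDot (l : List Char) :
    PySem.Chars.splitOn l ['.'] = pvSplitDot l := by
  unfold PySem.Chars.splitOn
  rw [splitOn_go_eq (l.length + 1) l [] [] (by omega)]
  cases h : pvSplitDot l with
  | nil => exact absurd h (pvSplitDot_ne_nil l)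
  | cons a t => simp

-- A's pre-slice output over the split equals B's whole-string flatMap plus one final dot word
lemma flatMap_split_eq (l : List Char) :
    (pvSplitDot l).flatMap (fun n => n.flatMap (fun c => [c, ' ']) ++ "dot ".toList)
      = l.flatMap pvEmit ++ "dot ".toList := by
  induction l with
  | nil => simp [pvSplitDot]
  | cons x l ih =>
    by_cases hx : x = '.'
    · subst hx
      simp only [pvSplitDot, if_true]
      rw [List.flatMap_cons, ih]
      simp [pvEmit]
    · simp only [pvSplitDot, if_neg hx]
      cases hs : pvSplitDot l with
      | nil => exact absurd hs (pvSplitDot_ne_nil l)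
      | cons a t =>
        rw [hs] at ih
        simp only [List.modifyHead_cons, List.flatMap_cons, List.flatMap_cons] at ih ⊢
        simp only [pvEmit, if_neg hx]
        simp only [List.append_assoc] at ih ⊢
        rw [ih]

-- ===== VERDICT (by name: the statement is the Claim_ definition above) =====
theorem ipv4_to_speech_spec : Claim_equal_ipv4_to_speech := by
  intro ipv4 _
  unfold Spec_ipv4_to_speech ipv4_to_speech ipv4_to_speech_alt
  rw [splitOn_eq_pvSplitDot]
  have hinner : ∀ (out n : List Char),
      (n.foldl (fun out c => out ++ [c, ' ']) out) ++ "dot ".toList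
        = out ++ (n.flatMap (fun c => [c, ' ']) ++ "dot ".toList) := by
    intro out n
    rw [PySem.List.foldl_append_eq_flatMap (fun c => [c, ' ']) n out, List.append_assoc]
  simp only [hinner]
  rw [PySem.List.foldl_append_eq_flatMap
        (fun n => n.flatMap (fun c => [c, ' ']) ++ "dot ".toList) (pvSplitDot ipv4.toList) []]
  rw [PySem.List.foldl_append_eq_flatMap
        (fun c => if c = '.' then "dot ".toList else [c, ' ']) ipv4.toList []]
  have hemit : (fun c => if c = '.' then "dot ".toList else [c, ' ']) = pvEmit := rfl
  rw [hemit]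
  simp only [List.nil_append, flatMap_split_eq]
  rw [PySem.List.slice_to_neg_ofNat _ 4 (by omega)]
  have hlen : (ipv4.toList.flatMap pvEmit ++ "dot ".toList).length - 4
      = (ipv4.toList.flatMap pvEmit).length := by simp
  rw [hlen, List.take_left]
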